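-- pv_equiv track=rewrite | github.com/CSU-KangHu/HiTE | bin/NeuralTE/utils/data_util.py | divided_array
-- ===== SOURCE A (Python) =====
-- def divided_array(original_array, partitions):
--     final_partitions = [[] for _ in range(partitions)]
--     node_index = 0
--
--     read_from_start = True
--     read_from_end = False
--     i = 0
--     j = len(original_array) - 1
--     while i <= j:
--         # read from file start
--         if read_from_start:
--             final_partitions[node_index % partitions].append(original_array[i])
--             i += 1
--         if read_from_end:
--             final_partitions[node_index % partitions].append(original_array[j])
--             j -= 1
--         node_index += 1
--         if node_index % partitions == 0:
--             # reverse
--             read_from_end = bool(1 - read_from_end)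
--             read_from_start = bool(1 - read_from_start)
--     return final_partitions
-- ===== SOURCE B (Python) =====
-- def divided_array(original_array, partitions):
--     # Closed-form index mapping: element k of the snake consumption order comes from
--     # original index (b//2)*p + k%p (front block, b = k//p even) or mirrored from the
--     # end (b odd); partition r is exactly the elements k = r, r+p, r+2p, ...
--     n = len(original_array)
--     result = []
--     for r in range(partitions):
--         part = []
--         for k in range(r, n, partitions):
--             b = k // partitions
--             off = (b // 2) * partitions + k % partitions
--             idx = off if b % 2 == 0 else n - 1 - off
--             part.append(original_array[idx])
--         result.append(part)
--     return result
-- ===== Notes on version B (the rewrite author's own statement) =====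
-- stated objective: alternative
-- what changed: B replaces A's stateful two-pointer snake walk (front/back indices plus two toggling flags threaded through one loop) by a closed-form index mapping: partition r is computed independently as the elements at original indices (b//2)*p + k%p or mirrored n-1-that for k = r, r+p, r+2p, ..., with no pointers, flags or shared mutable state.
import Mathlib
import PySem

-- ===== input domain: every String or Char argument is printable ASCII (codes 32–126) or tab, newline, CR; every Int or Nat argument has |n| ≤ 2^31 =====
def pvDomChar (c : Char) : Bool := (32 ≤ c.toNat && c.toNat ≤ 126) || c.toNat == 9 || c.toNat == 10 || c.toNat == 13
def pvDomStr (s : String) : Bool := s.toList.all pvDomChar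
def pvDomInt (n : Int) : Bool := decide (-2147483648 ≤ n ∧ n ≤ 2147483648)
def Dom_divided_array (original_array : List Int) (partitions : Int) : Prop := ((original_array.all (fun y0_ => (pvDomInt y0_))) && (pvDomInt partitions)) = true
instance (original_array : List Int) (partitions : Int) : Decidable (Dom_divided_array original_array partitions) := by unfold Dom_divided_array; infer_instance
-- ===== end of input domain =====

-- B replaces A's stateful two-pointer snake walk by a closed-form index mapping computing
-- each partition independently; same O(n) cost. Equivalence proved on Pre_ (A raises outside it).

-- ===== PORT A =====
-- One iteration of A's while loop per fuel unit; each iteration consumes exactly one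
-- element (the flags are always complementary), so fuel = length suffices.
-- fp.modify at (node_index % partitions).toNat: inside Pre_ the index is ≥ 0 and < partitions,
-- so toNat is exact (a negative Python index, an IndexError, happens only outside Pre_).
def divided_array_loop (arr : List Int) (p : Int) :
    Nat → List (List Int) → Int → Bool → Bool → Int → Int → List (List Int)
  | 0, fp, _, _, _, _, _ => fp
  | fuel + 1, fp, ni, rs, re, i, j =>
    if i ≤ j then
      let fp1 := if rs then fp.modify (PySem.Int.mod ni p).toNat (· ++ [(PySem.List.pyGet? arr i).getD 0]) else fp
      let i1 := if rs then i + 1 else i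
      let fp2 := if re then fp1.modify (PySem.Int.mod ni p).toNat (· ++ [(PySem.List.pyGet? arr j).getD 0]) else fp1
      let j1 := if re then j - 1 else j
      let ni1 := ni + 1
      if PySem.Int.mod ni1 p = 0 then
        divided_array_loop arr p fuel fp2 ni1 (!rs) (!re) i1 j1
      else
        divided_array_loop arr p fuel fp2 ni1 rs re i1 j1
    else fp

def divided_array (original_array : List Int) (partitions : Int) : List (List Int) :=
  let final_partitions := (List.range partitions.toNat).map (fun _ => ([] : List Int))
  divided_array_loop original_array partitions original_array.length
    final_partitions 0 true false 0 (original_array.length - 1)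

-- ===== PORT B =====
-- Source B: for each partition r, walk k = r, r+p, r+2p, … < n and fetch the element at the
-- closed-form original index (b//2)*p + k%p (b = k//p even) or its mirror n-1-… (b odd).
def divided_array_alt (original_array : List Int) (partitions : Int) : List (List Int) :=
  let n : Int := original_array.length
  (PySem.List.pyRange 0 partitions 1).foldl (fun result r =>
    result ++ [(PySem.List.pyRange r n partitions).foldl (fun part k =>
      let b := PySem.Int.floordiv k partitions
      let off := PySem.Int.floordiv b 2 * partitions + PySem.Int.mod k partitions
      let idx := if PySem.Int.mod b 2 = 0 then off else n - 1 - off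
      part ++ [(PySem.List.pyGet? original_array idx).getD 0]) []]) []

-- ===== PRECONDITION & SPEC =====
-- Pre_ excludes exactly the inputs where A raises: partitions ≤ 0 with a nonempty array
-- (ZeroDivisionError for partitions == 0, IndexError for negative partitions).
def Pre_divided_array (original_array : List Int) (partitions : Int) : Prop :=
  1 ≤ partitions ∨ original_array = []
instance (original_array : List Int) (partitions : Int) : Decidable (Pre_divided_array original_array partitions) := by unfold Pre_divided_array; infer_instance

def pvWitness_divided_array : List Int × Int := ([1, 2, 3, 4, 5], 2)

def Spec_divided_array (original_array : List Int) (partitions : Int) (out : List (List Int)) : Prop := out = divided_array_alt original_array partitions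
instance (original_array : List Int) (partitions : Int) (out : List (List Int)) : Decidable (Spec_divided_array original_array partitions out) := by unfold Spec_divided_array; infer_instance

-- ===== CLAIM (what is proved, stated in full; the proofs are below) =====
def Claim_equal_divided_array : Prop := ∀ (original_array : List Int) (partitions : Int), Dom_divided_array original_array partitions → Pre_divided_array original_array partitions → Spec_divided_array original_array partitions (divided_array original_array partitions)

-- ===== LEMMAS AND PROOFS =====

-- ---- A-side abstraction: A's loop = round-robin distribution of the snake consumption order ----

-- Distribute `order` into `fp`, element k going to partition (c + k) % p.
def distFrom (p : Int) : List (List Int) → Nat → List Int → List (List Int)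
  | fp, _, [] => fp
  | fp, c, x :: xs => distFrom p (fp.modify (PySem.Int.mod (c : Int) p).toNat (· ++ [x])) (c + 1) xs

-- the snake consumption order, one element per step, counter c in place of node_index
def snake_core (arr : List Int) (p : Int) :
    Nat → Nat → Bool → Int → Int → List Int
  | 0, _, _, _, _ => []
  | fuel + 1, c, fs, i, j =>
    if i ≤ j then
      let x := if fs then (PySem.List.pyGet? arr i).getD 0 else (PySem.List.pyGet? arr j).getD 0
      let i1 := if fs then i + 1 else i
      let j1 := if fs then j else j - 1
      let fs1 := if PySem.Int.mod ((c : Int) + 1) p = 0 then !fs else fs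
      x :: snake_core arr p fuel (c + 1) fs1 i1 j1
    else []

theorem main_loop_eq (arr : List Int) (p : Int) :
    ∀ (fuel : Nat) (fp : List (List Int)) (c : Nat) (rs : Bool) (i j : Int),
      divided_array_loop arr p fuel fp (c : Int) rs (!rs) i j =
        distFrom p fp c (snake_core arr p fuel c rs i j) := by
  intro fuel
  induction fuel with
  | zero => intro fp c rs i j; simp [divided_array_loop, snake_core, distFrom]
  | succ n ih =>
    intro fp c rs i j
    simp only [divided_array_loop, snake_core]
    by_cases h : i ≤ j
    · simp only [h, if_true]
      have hc : (c : Int) + 1 = ((c + 1 : Nat) : Int) := by push_cast; ring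
      cases rs with
      | true =>
        simp only [Bool.not_true, Bool.false_eq_true, ite_true, ite_false, distFrom]
        split_ifs with hm
        all_goals rw [hc]
        · simpa using ih _ (c + 1) false (i + 1) j
        · simpa using ih _ (c + 1) true (i + 1) j
      | false =>
        simp only [Bool.not_false, Bool.false_eq_true, ite_true, ite_false, distFrom]
        split_ifs with hm
        all_goals rw [hc]
        · simpa using ih _ (c + 1) true i (j - 1)
        · simpa using ih _ (c + 1) false i (j - 1)
    · simp [h, distFrom]

-- ---- the closed-form snake index and element ----

-- original index of the k-th consumed element (q = number of partitions)
def sidx (n q k : Nat) : Nat :=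
  if (k / q) % 2 = 0 then (k / q / 2) * q + k % q else n - 1 - ((k / q / 2) * q + k % q)

def eF (arr : List Int) (q k : Nat) : Int :=
  (PySem.List.pyGet? arr ((sidx arr.length q k : Nat) : Int)).getD 0

-- number of front-consumed elements among steps 0..c-1
def G (q c : Nat) : Nat := ((c / q) + 1) / 2 * q + (if (c / q) % 2 = 0 then c % q else 0)

theorem div_mod_succ (q c : Nat) (hq : 1 ≤ q) :
    ((c + 1) % q = 0 → (c + 1) / q = c / q + 1 ∧ c % q = q - 1) ∧
    ((c + 1) % q ≠ 0 → (c + 1) / q = c / q ∧ (c + 1) % q = c % q + 1) := by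
  have h0 : 0 < q := hq
  have hd : q * (c / q) + c % q = c := Nat.div_add_mod c q
  have hm : c % q < q := Nat.mod_lt _ h0
  by_cases hb : c % q + 1 = q
  · have hq1 : q * (c / q + 1) = q * (c / q) + q := by ring
    have hc1 : c + 1 = q * (c / q + 1) := by omega
    have hdiv : (c + 1) / q = c / q + 1 := by rw [hc1, Nat.mul_div_cancel_left _ h0]
    have hmod : (c + 1) % q = 0 := by rw [hc1]; exact Nat.mul_mod_right q _
    refine ⟨fun _ => ⟨hdiv, by omega⟩, fun h => absurd hmod h⟩
  · have hc1 : c + 1 = q * (c / q) + (c % q + 1) := by omega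
    have hdiv : (c + 1) / q = c / q := by
      rw [hc1, Nat.mul_add_div h0]
      simp [Nat.div_eq_of_lt (show c % q + 1 < q by omega)]
    have hmod : (c + 1) % q = c % q + 1 := by
      rw [hc1, Nat.mul_add_mod]
      exact Nat.mod_eq_of_lt (by omega)
    refine ⟨fun h => by omega, fun _ => ⟨hdiv, hmod⟩⟩

theorem G_succ (q c : Nat) (hq : 1 ≤ q) :
    G q (c + 1) = G q c + (if (c / q) % 2 = 0 then 1 else 0) := by
  unfold G
  obtain ⟨hz, hnz⟩ := div_mod_succ q c hq
  by_cases hb : (c + 1) % q = 0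
  · obtain ⟨hdiv, hmod⟩ := hz hb
    rw [hdiv, hb]
    by_cases hpar : (c / q) % 2 = 0
    · have h1 : (c / q + 1 + 1) / 2 = c / q / 2 + 1 := by omega
      have h2 : (c / q + 1) / 2 = c / q / 2 := by omega
      have h3 : (c / q + 1) % 2 ≠ 0 := by omega
      rw [h1, h2, if_neg h3, if_pos hpar, if_pos hpar, hmod]
      have : (c / q / 2 + 1) * q = c / q / 2 * q + q := by ring
      omega
    · have h1 : (c / q + 1 + 1) / 2 = (c / q + 1) / 2 := by omega
      have h3 : (c / q + 1) % 2 = 0 := by omega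
      rw [h1, if_pos h3, if_neg hpar, if_neg hpar]
  · obtain ⟨hdiv, hmod⟩ := hnz hb
    rw [hdiv, hmod]
    by_cases hpar : (c / q) % 2 = 0 <;> simp [hpar] <;> omega

theorem G_le (q c : Nat) (hq : 1 ≤ q) : G q c ≤ c := by
  induction c with
  | zero => simp [G, Nat.div_eq_of_lt hq, Nat.mod_eq_of_lt hq]
  | succ n ih => rw [G_succ q n hq]; split_ifs <;> omega

theorem fs_succ (q c : Nat) (hq : 1 ≤ q) :
    decide (((c + 1) / q) % 2 = 0) =
      if (c + 1) % q = 0 then !decide ((c / q) % 2 = 0) else decide ((c / q) % 2 = 0) := by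
  obtain ⟨hz, hnz⟩ := div_mod_succ q c hq
  by_cases hb : (c + 1) % q = 0
  · obtain ⟨hdiv, _⟩ := hz hb
    rw [if_pos hb, hdiv]
    by_cases hpar : (c / q) % 2 = 0 <;> simp [hpar] <;> omega
  · obtain ⟨hdiv, _⟩ := hnz hb
    rw [if_neg hb, hdiv]

theorem sidx_front (n q c : Nat) (h : (c / q) % 2 = 0) :
    sidx n q c = G q c := by
  rw [sidx, if_pos h, G, if_pos h]
  have : (c / q + 1) / 2 = c / q / 2 := by omega
  rw [this]

theorem sidx_back (n q c : Nat) (hq : 1 ≤ q) (h : ¬ (c / q) % 2 = 0) (hc : c < n) :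
    ((sidx n q c : Nat) : Int) = (n : Int) - 1 - (c : Int) + (G q c : Int) := by
  rw [sidx, if_neg h, G, if_neg h]
  have hd : q * (c / q) + c % q = c := Nat.div_add_mod c q
  have h1 : (c / q + 1) / 2 = c / q / 2 + 1 := by omega
  rw [h1]
  set m := c / q / 2 with hm
  have hb2 : c / q = 2 * m + 1 := by omega
  have h2 : q * (c / q) = 2 * (q * m) + q := by rw [hb2]; ring
  have h4 : (m + 1) * q = q * m + q := by ring
  have h5 : m * q = q * m := by ring
  have hnat : n - 1 - (m * q + c % q) = (n - 1 - c) + ((m + 1) * q + 0) := by omega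
  rw [hnat]
  have hcast : ((n : Int) - 1 - c) = ((n - 1 - c : Nat) : Int) := by
    rw [Nat.cast_sub (by omega), Nat.cast_sub (by omega)]
    push_cast
    ring
  rw [hcast]
  push_cast
  ring

-- closed form of the snake consumption order
theorem core_eq (arr : List Int) (p : Int) (hp : 1 ≤ p) :
    ∀ (fuel c : Nat) (fs : Bool) (i j : Int), c + fuel = arr.length →
      fs = decide ((c / p.toNat) % 2 = 0) → i = (G p.toNat c : Int) →
      j = (arr.length : Int) - 1 - (c : Int) + (G p.toNat c : Int) →
      snake_core arr p fuel c fs i j = (List.range' c fuel).map (eF arr p.toNat) := by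
  have hq : 1 ≤ p.toNat := by omega
  have hpq : p = (p.toNat : Int) := by omega
  intro fuel
  induction fuel with
  | zero => intro c fs i j _ _ _ _; simp [snake_core]
  | succ fuel ih =>
    intro c fs i j hn hfs hi hj
    have hGle : G p.toNat c ≤ c := G_le _ _ hq
    have hcn : c < arr.length := by omega
    have hij : i ≤ j := by subst hi hj; omega
    rw [snake_core, if_pos hij, List.range'_succ, List.map_cons]
    have hmodc : PySem.Int.mod ((c : Int) + 1) p = (((c + 1) % p.toNat : Nat) : Int) := by
      conv_lhs => rw [hpq, show ((c : Int) + 1) = ((c + 1 : Nat) : Int) by push_cast; ring]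
      rw [PySem.Int.mod_natCast]
    have hfs1 : (if PySem.Int.mod ((c : Int) + 1) p = 0 then !fs else fs) =
        decide (((c + 1) / p.toNat) % 2 = 0) := by
      rw [hmodc, hfs, fs_succ _ _ hq]
      simp only [Int.natCast_eq_zero]
    by_cases hpar : (c / p.toNat) % 2 = 0
    · have hfst : fs = true := by rw [hfs]; simp [hpar]
      subst hfst
      simp only [if_true]
      refine (List.cons_eq_cons).mpr ⟨?_, ?_⟩
      · show (PySem.List.pyGet? arr i).getD 0 = eF arr p.toNat c
        rw [eF, hi, sidx_front _ _ _ hpar]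
      · rw [hfs1]
        apply ih (c + 1) _ (i + 1) j (by omega) rfl
        · rw [hi, G_succ _ _ hq, if_pos hpar]; push_cast; ring
        · rw [hj, G_succ _ _ hq, if_pos hpar]; push_cast; ring
    · have hfst : fs = false := by rw [hfs]; simp [hpar]
      subst hfst
      simp only [Bool.false_eq_true, if_false]
      refine (List.cons_eq_cons).mpr ⟨?_, ?_⟩
      · show (PySem.List.pyGet? arr j).getD 0 = eF arr p.toNat c
        rw [eF, hj, sidx_back _ _ _ hq hpar hcn]
      · rw [hfs1]
        apply ih (c + 1) _ i (j - 1) (by omega) rfl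
        · rw [hi, G_succ _ _ hq, if_neg hpar]; push_cast; ring
        · rw [hj, G_succ _ _ hq, if_neg hpar]; push_cast; ring

-- ---- distFrom pointwise ----

-- the elements of `order` that land in partition r when distribution starts at counter c
def pick (q r : Nat) : Nat → List Int → List Int
  | _, [] => []
  | c, x :: xs => if c % q = r then x :: pick q r (c + 1) xs else pick q r (c + 1) xs

theorem distFrom_length (p : Int) (order : List Int) :
    ∀ (fp : List (List Int)) (c : Nat), (distFrom p fp c order).length = fp.length := by
  induction order with
  | nil => intro fp c; rfl
  | cons x xs ih => intro fp c; rw [distFrom, ih, List.length_modify]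

theorem distFrom_getD (p : Int) (hp : 1 ≤ p) (order : List Int) :
    ∀ (fp : List (List Int)) (c r : Nat), fp.length = p.toNat → r < p.toNat →
      (distFrom p fp c order).getD r [] = fp.getD r [] ++ pick p.toNat r c order := by
  have hpq : p = (p.toNat : Int) := by omega
  induction order with
  | nil => intro fp c r _ _; simp [distFrom, pick]
  | cons x xs ih =>
    intro fp c r hlen hr
    have hidx : (PySem.Int.mod (c : Int) p).toNat = c % p.toNat := by
      conv_lhs => rw [hpq, PySem.Int.mod_natCast]
      exact Int.toNat_natCast _
    rw [distFrom, hidx, ih _ _ _ (by rw [List.length_modify]; exact hlen) hr]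
    have hrlt : r < fp.length := by omega
    rw [List.getD_eq_getElem _ _ (by rw [List.length_modify]; exact hrlt),
        List.getD_eq_getElem _ _ hrlt]
    rw [List.getElem_modify]
    by_cases hcr : c % p.toNat = r
    · rw [if_pos hcr, pick, if_pos hcr, List.append_assoc, List.singleton_append]
    · rw [if_neg hcr, pick, if_neg hcr]

theorem pick_map_range' (q r : Nat) (f : Nat → Int) :
    ∀ (m c : Nat), pick q r c ((List.range' c m).map f) =
      ((List.range' c m).filter (fun k => k % q == r)).map f := by
  intro m
  induction m with
  | zero => intro c; rfl
  | succ m ih =>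
    intro c
    rw [List.range'_succ, List.map_cons, pick, List.filter_cons]
    by_cases hcr : c % q = r
    · rw [if_pos hcr, if_pos (by simpa using hcr), List.map_cons, ih]
    · rw [if_neg hcr, if_neg (by simpa using hcr), ih]

-- the k < n with k % q = r are exactly q*t + r for t < (n - r + q - 1) / q
theorem filter_range_eq (n q r : Nat) (hq : 1 ≤ q) (hr : r < q) :
    (List.range n).filter (fun k => k % q == r) =
      (List.range (if r < n then (n - r + q - 1) / q else 0)).map (fun t => q * t + r) := by
  set M := if r < n then (n - r + q - 1) / q else 0 with hM
  have hMlt : ∀ t : Nat, t < M ↔ q * t + r < n := by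
    intro t
    constructor
    · intro ht
      have hrn : r < n := by by_contra hc; simp [hc] at hM; omega
      rw [hM, if_pos hrn] at ht
      have := (Nat.le_div_iff_mul_le (by omega : 0 < q)).mp (by omega : t + 1 ≤ (n - r + q - 1) / q)
      have he : (t + 1) * q = q * t + q := by ring
      omega
    · intro ht
      have hrn : r < n := by omega
      rw [hM, if_pos hrn]
      have he : (t + 1) * q = q * t + q := by ring
      have := (Nat.le_div_iff_mul_le (by omega : 0 < q)).mpr (by omega : (t + 1) * q ≤ n - r + q - 1)
      omega
  have hmono : ∀ a b : Nat, a < b → q * a + r < q * b + r := by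
    intro a b hab
    have := (Nat.mul_lt_mul_left (by omega : 0 < q)).mpr hab
    omega
  have hpw1 : ((List.range n).filter (fun k => k % q == r)).Pairwise (· < ·) :=
    (List.pairwise_lt_range).filter _
  have hpw2 : ((List.range M).map (fun t => q * t + r)).Pairwise (· < ·) :=
    List.pairwise_map.mpr ((List.pairwise_lt_range).imp (fun h => hmono _ _ h))
  have hperm : ((List.range n).filter (fun k => k % q == r)).Perm
      ((List.range M).map (fun t => q * t + r)) := by
    rw [List.perm_ext_iff_of_nodup (hpw1.imp (fun h => Nat.ne_of_lt h))
      (hpw2.imp (fun h => Nat.ne_of_lt h))]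
    intro a
    rw [List.mem_filter, List.mem_map, List.mem_range]
    constructor
    · rintro ⟨ha, hmod⟩
      have hmod' : a % q = r := by simpa using hmod
      refine ⟨a / q, ?_, ?_⟩
      · rw [List.mem_range, hMlt]
        have := Nat.div_add_mod a q
        omega
      · have := Nat.div_add_mod a q
        omega
    · rintro ⟨t, htM, hta⟩
      rw [List.mem_range] at htM
      constructor
      · rw [← hta]; exact (hMlt t).mp htM
      · rw [← hta]
        simp [Nat.mod_eq_of_lt hr]
  exact List.Perm.eq_of_pairwise (fun a b _ _ h1 h2 => by omega) hpw1 hpw2 hperm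

-- ---- B-side: the inner fold in closed form ----

theorem alt_inner_eq (arr : List Int) (p : Int) (hp : 1 ≤ p) (r : Nat) (hr : r < p.toNat) :
    (PySem.List.pyRange (r : Int) (arr.length : Int) p).foldl (fun part k =>
      part ++ [(PySem.List.pyGet? arr
        (if PySem.Int.mod (PySem.Int.floordiv k p) 2 = 0 then
          PySem.Int.floordiv (PySem.Int.floordiv k p) 2 * p + PySem.Int.mod k p
        else (arr.length : Int) - 1 -
          (PySem.Int.floordiv (PySem.Int.floordiv k p) 2 * p + PySem.Int.mod k p))).getD 0]) [] =
    (List.range (if r < arr.length then (arr.length - r + p.toNat - 1) / p.toNat else 0)).map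
      (fun t => eF arr p.toNat (p.toNat * t + r)) := by
  have hq : 1 ≤ p.toNat := by omega
  have hpq : p = (p.toNat : Int) := by omega
  set q := p.toNat with hqdef
  set n := arr.length with hndef
  rw [PySem.List.foldl_append_singleton_eq_map, List.nil_append]
  rw [PySem.List.pyRange_of_pos _ _ (by omega : (0:Int) < p)]
  have hN : (if (r : Int) < (n : Int) then (((n : Int) - r + p - 1) / p).toNat else 0) =
      (if r < n then (n - r + q - 1) / q else 0) := by
    by_cases hrn : r < n
    · rw [if_pos (by exact_mod_cast hrn), if_pos hrn]
      rw [hpq]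
      rw [show ((n : Int) - r + (q : Int) - 1) = ((n - r + q - 1 : Nat) : Int) by omega]
      rw [← Int.natCast_div, Int.toNat_natCast]
    · rw [if_neg (by exact_mod_cast hrn), if_neg hrn]
  rw [hN, List.map_map]
  apply List.map_congr_left
  intro t ht
  rw [List.mem_range] at ht
  have htn : q * t + r < n := by
    by_cases hrn : r < n
    · rw [if_pos hrn] at ht
      have := (Nat.le_div_iff_mul_le (by omega : 0 < q)).mp (by omega : t + 1 ≤ (n - r + q - 1) / q)
      have he : (t + 1) * q = q * t + q := by ring
      omega
    · rw [if_neg hrn] at ht; omega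
  have hk : (r : Int) + p * (t : Int) = ((q * t + r : Nat) : Int) := by
    rw [hpq]; push_cast; ring
  have hdivq : (q * t + r) / q = t := by
    rw [Nat.mul_add_div (by omega), Nat.div_eq_of_lt hr]
    omega
  have hmodq : (q * t + r) % q = r := by
    rw [Nat.mul_add_mod, Nat.mod_eq_of_lt hr]
  have hfd : PySem.Int.floordiv ((r : Int) + p * t) p = (t : Int) := by
    rw [hk]
    conv_lhs => rw [hpq]
    rw [PySem.Int.floordiv_natCast, hdivq]
  have hmd : PySem.Int.mod ((r : Int) + p * t) p = (r : Int) := by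
    rw [hk]
    conv_lhs => rw [hpq]
    rw [PySem.Int.mod_natCast, hmodq]
  have hfd2 : PySem.Int.floordiv (t : Int) 2 = ((t / 2 : Nat) : Int) := by
    exact_mod_cast PySem.Int.floordiv_natCast t 2
  have hmd2 : PySem.Int.mod (t : Int) 2 = ((t % 2 : Nat) : Int) := by
    exact_mod_cast PySem.Int.mod_natCast t 2
  simp only [Function.comp]
  rw [hfd, hmd, hfd2, hmd2]
  have hoff : ((t / 2 : Nat) : Int) * p + (r : Int) = ((t / 2 * q + r : Nat) : Int) := by
    rw [hpq]; push_cast; ring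
  have hoffle : t / 2 * q + r ≤ n - 1 := by
    have h1 : t / 2 * q ≤ t * q := Nat.mul_le_mul_right _ (Nat.div_le_self _ _)
    have h2 : t * q = q * t := by ring
    omega
  rw [eF]
  rw [sidx, hdivq, hmodq]
  by_cases hpar : t % 2 = 0
  · rw [if_pos (by exact_mod_cast congrArg (Nat.cast : Nat → Int) hpar), if_pos hpar, hoff]
  · have hpar' : ¬ ((t % 2 : Nat) : Int) = 0 := by exact_mod_cast hpar
    rw [if_neg hpar', if_neg hpar, hoff]
    congr 1
    rw [show ((n - 1 - (t / 2 * q + r) : Nat) : Int) =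
      (n : Int) - 1 - ((t / 2 * q + r : Nat) : Int) by
        rw [Nat.cast_sub hoffle, Nat.cast_sub (by omega : 1 ≤ n)]; norm_num]

-- ---- assembly ----

theorem main_equal (arr : List Int) (p : Int) (hpre : 1 ≤ p ∨ arr = []) :
    divided_array arr p = divided_array_alt arr p := by
  by_cases hp : 1 ≤ p
  · have hq : 1 ≤ p.toNat := by omega
    have hG0 : G p.toNat 0 = 0 := by simp [G, Nat.zero_div, Nat.zero_mod]
    have hA : divided_array arr p =
        distFrom p ((List.range p.toNat).map (fun _ => ([] : List Int))) 0
          ((List.range arr.length).map (eF arr p.toNat)) := by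
      rw [divided_array]
      have hml := main_loop_eq arr p arr.length
        ((List.range p.toNat).map fun _ => ([] : List Int)) 0 true 0 ((arr.length : Int) - 1)
      simp only [Nat.cast_zero, Bool.not_true] at hml
      rw [hml]
      congr 1
      rw [core_eq arr p hp arr.length 0 true 0 ((arr.length : Int) - 1) (by omega)
        (by simp [Nat.zero_div]) (by rw [hG0]; simp) (by rw [hG0]; push_cast; ring),
        List.range_eq_range']
    have hB : divided_array_alt arr p = (List.range p.toNat).map (fun r =>
        (List.range (if r < arr.length then (arr.length - r + p.toNat - 1) / p.toNat else 0)).map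
          (fun t => eF arr p.toNat (p.toNat * t + r))) := by
      rw [divided_array_alt]
      rw [PySem.List.foldl_append_singleton_eq_map, List.nil_append]
      rw [PySem.List.pyRange_one 0 p]
      simp only [Int.sub_zero, List.map_map]
      apply List.map_congr_left
      intro r hr
      rw [List.mem_range] at hr
      have := alt_inner_eq arr p hp r hr
      simpa [Function.comp] using this
    rw [hA, hB]
    apply List.ext_getElem
    · simp [distFrom_length]
    · intro r h1 h2
      have hrq : r < p.toNat := by
        rw [distFrom_length, List.length_map, List.length_range] at h1
        exact h1
      rw [← List.getD_eq_getElem _ [] h1, ← List.getD_eq_getElem _ [] h2]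
      rw [distFrom_getD p hp _ _ 0 r (by rw [List.length_map, List.length_range]) hrq]
      have hinit : ((List.range p.toNat).map (fun _ => ([] : List Int))).getD r [] = [] := by
        rw [List.getD_eq_getElem _ [] (by rw [List.length_map, List.length_range]; exact hrq)]
        simp
      rw [hinit, List.nil_append]
      rw [List.range_eq_range', pick_map_range', ← List.range_eq_range',
        filter_range_eq arr.length p.toNat r hq hrq, List.map_map]
      rw [List.getD_eq_getElem _ [] h2]
      simp [Function.comp]
  · have harr : arr = [] := hpre.resolve_left hp
    subst harr
    rw [divided_array, divided_array_alt]
    simp only [List.length_nil]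
    rw [show p.toNat = 0 by omega, PySem.List.pyRange_one_eq_nil (by omega : p ≤ 0)]
    simp [divided_array_loop]

-- ===== VERDICT (by name: the statement is the Claim_ definition above) =====
theorem divided_array_spec : Claim_equal_divided_array := by
  intro arr p _ hpre
  show divided_array arr p = divided_array_alt arr p
  exact main_equal arr p hpre
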